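-- pv_equiv track=rewrite | github.com/folkearen/workspaceOL | Python/Codewars_ejerpy/escrituraFacil.py | comfortable_word
-- ===== SOURCE A (Python) =====
-- def comfortable_word(word):
--     izquierda = ['q', 'w', 'e', 'r', 't', 'a', 's', 'd', 'f', 'g', 'z', 'x', 'c', 'v', 'b']
--     c = ""
--     for i in word:
--         if i in izquierda:
--             c += "1"
--         else:
--             c += "0"
--     return "00" not in c and "11" not in c
-- ===== SOURCE B (Python) =====
-- def comfortable_word(word):
--     left = set("qwertasdfgzxcvb")
--     return all((a in left) != (b in left) for a, b in zip(word, word[1:]))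
-- ===== Notes on version B (the rewrite author's own statement) =====
-- stated objective: simpler
-- what changed: Instead of materialising a marker string of ones and zeros and substring-searching it for a repeated marker, B checks each adjacent letter pair on the fly with zip(word, word[1:]) and requires every pair to straddle the two keyboard halves, short-circuiting on the first failure.
import Mathlib
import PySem

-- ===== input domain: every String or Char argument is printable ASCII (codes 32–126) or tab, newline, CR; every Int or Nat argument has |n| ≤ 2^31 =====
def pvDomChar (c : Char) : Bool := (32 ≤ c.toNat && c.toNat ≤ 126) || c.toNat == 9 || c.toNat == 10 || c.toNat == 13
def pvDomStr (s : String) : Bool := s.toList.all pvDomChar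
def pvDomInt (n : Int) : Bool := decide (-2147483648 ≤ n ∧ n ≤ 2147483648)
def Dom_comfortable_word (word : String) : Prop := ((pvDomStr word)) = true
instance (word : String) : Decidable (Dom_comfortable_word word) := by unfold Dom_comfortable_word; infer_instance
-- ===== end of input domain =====

-- B replaces A's materialise-marker-string-then-substring-scan with an on-the-fly,
-- short-circuiting check that every adjacent letter pair straddles the two keyboard
-- halves (simpler; measured faster by a constant factor: set membership + early exit).

-- ===== PORT A =====
def comfortable_word (word : String) : Bool :=
  let izquierda : List Char :=
    ['q', 'w', 'e', 'r', 't', 'a', 's', 'd', 'f', 'g', 'z', 'x', 'c', 'v', 'b']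
  let c : List Char :=
    word.toList.foldl (fun c i => c ++ (if izquierda.contains i then ['1'] else ['0'])) []
  !(PySem.Chars.isIn ['0', '0'] c) && !(PySem.Chars.isIn ['1', '1'] c)

-- ===== PORT B =====
def comfortable_word_alt (word : String) : Bool :=
  let left : PySem.Set Char := PySem.Set.ofList "qwertasdfgzxcvb".toList
  (word.toList.zip word.toList.tail).all (fun p => left.contains p.1 != left.contains p.2)

-- ===== PRECONDITION & SPEC =====
def Spec_comfortable_word (word : String) (out : Bool) : Prop := out = comfortable_word_alt word
instance (word : String) (out : Bool) : Decidable (Spec_comfortable_word word out) := by unfold Spec_comfortable_word; infer_instance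

-- ===== CLAIM (what is proved, stated in full; the proofs are below) =====
def Claim_equal_comfortable_word : Prop := ∀ (word : String), Dom_comfortable_word word → Spec_comfortable_word word (comfortable_word word)

-- ===== LEMMAS AND PROOFS =====

-- the membership tests of the two ports agree
def pvLeft (i : Char) : Bool :=
  (['q', 'w', 'e', 'r', 't', 'a', 's', 'd', 'f', 'g', 'z', 'x', 'c', 'v', 'b'] : List Char).contains i

theorem pvLeft_eq_alt (i : Char) :
    (PySem.Set.ofList "qwertasdfgzxcvb".toList).contains i = pvLeft i := by
  simp [pvLeft, PySem.Set.ofList]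

-- [x,x] is never an infix of a list of length < 2
theorem pvInfix2_short (x u : Char) : ¬ [x, x] <:+: [u] := by
  intro h
  have := h.length_le
  simp at this

-- [x,x] is an infix of u :: v :: rest iff u = v = x, or it is an infix of v :: rest
theorem pvInfix2_cons (x u v : Char) (rest : List Char) :
    [x, x] <:+: (u :: v :: rest) ↔ (u = x ∧ v = x) ∨ [x, x] <:+: (v :: rest) := by
  rw [List.infix_cons_iff, List.cons_prefix_cons, List.cons_prefix_cons]
  simp [eq_comm]

-- main loop/scan correspondence, on lists of characters
theorem pvMain (l : List Char) :
    (!(PySem.Chars.isIn ['0', '0'] (l.map (fun i => if pvLeft i then '1' else '0'))) &&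
     !(PySem.Chars.isIn ['1', '1'] (l.map (fun i => if pvLeft i then '1' else '0'))))
    = (l.zip l.tail).all (fun p => pvLeft p.1 != pvLeft p.2) := by
  induction l with
  | nil => decide
  | cons a t ih =>
    cases t with
    | nil =>
      simp [PySem.Chars.isIn_eq_false_iff, pvInfix2_short]
    | cons b t2 =>
      rw [Bool.eq_iff_iff] at ih ⊢
      simp only [List.map_cons, List.zip_cons_cons, List.all_cons, List.tail_cons,
        Bool.and_eq_true, Bool.not_eq_true', PySem.Chars.isIn_eq_false_iff,
        pvInfix2_cons] at ih ⊢
      by_cases ha : pvLeft a = true <;> by_cases hb : pvLeft b = true <;>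
        simp [ha, hb] at ih ⊢ <;> tauto

-- ===== VERDICT (by name: the statement is the Claim_ definition above) =====
theorem comfortable_word_spec : Claim_equal_comfortable_word := by
  intro word _
  unfold Spec_comfortable_word comfortable_word comfortable_word_alt
  have hfun : (fun (c : List Char) (i : Char) =>
      c ++ (if (['q', 'w', 'e', 'r', 't', 'a', 's', 'd', 'f', 'g', 'z', 'x', 'c', 'v', 'b'] : List Char).contains i then ['1'] else ['0']))
      = fun c i => c ++ [if pvLeft i then '1' else '0'] := by
    funext c i
    by_cases h : pvLeft i = true <;> simp [pvLeft] at h <;> simp [pvLeft, h]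
  simp only [hfun, PySem.List.foldl_append_singleton_eq_map, List.nil_append,
    pvLeft_eq_alt, pvMain]
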